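-- pv_equiv track=rewrite | github.com/aqemery/advent-of-code | 2015/06.py | part1
-- ===== SOURCE A (Python) =====
-- from itertools import chain
--
-- def ranges(rest):
--     p1, _, p2 = rest
--     x1, y1 = map(int, p1.split(','))
--     x2, y2 = map(int, p2.split(','))
--     for x in range(x1,x2+1):
--         for y in range(y1,y2+1):
--             yield x, y
--
-- def part1(data):
--     s = 1000
--     grid = [[False] * s for _ in range(s)]
--     for l in data:
--         match l.split():
--             case ['turn', on_off, *rest]:
--                 on = on_off == 'on'
--                 for x, y in ranges(rest):
--                     grid[x][y] = on
--             case ['toggle', *rest]: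
--                 for x, y in ranges(rest):
--                     grid[x][y] = not grid[x][y]
--
--     return sum(chain.from_iterable(grid))
-- ===== SOURCE B (Python) =====
-- def parse_line(l):
--     parts = l.split()
--     if parts[:1] == ['turn'] and len(parts) >= 2:
--         op, rest = ('on' if parts[1] == 'on' else 'off'), parts[2:]
--     elif parts[:1] == ['toggle']:
--         op, rest = 'toggle', parts[1:]
--     else:
--         return None
--     x1, y1 = map(int, rest[0].split(','))
--     x2, y2 = map(int, rest[2].split(','))
--     return op, x1, y1, x2, y2
--
-- def part1(data):
--     # last-writer-wins reverse sweep: scan instructions from last to first; a 'turn'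
--     # decides a cell permanently (value = on XOR parity of later toggles), toggles on
--     # undecided cells accumulate parity; undecided cells end lit iff their parity is odd.
--     instrs = [i for l in data if (i := parse_line(l)) is not None]
--     decided = set()
--     flip = set()
--     count = 0
--     for op, x1, y1, x2, y2 in reversed(instrs):
--         for x in range(x1, x2 + 1):
--             for y in range(y1, y2 + 1):
--                 c = (x, y)
--                 if c in decided:
--                     continue
--                 if op == 'toggle':
--                     if c in flip:
--                         flip.remove(c)
--                     else:
--                         flip.add(c)
--                 else:
--                     decided.add(c)
--                     if (op == 'on') != (c in flip):
--                         count += 1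
--                     flip.discard(c)
--     return count + len(flip)
-- ===== Notes on version B (the rewrite author's own statement) =====
-- stated objective: alternative
-- what changed: B first parses all instructions, then runs a single last-writer-wins sweep over them in REVERSE order, maintaining a decided-set (cells permanently fixed by the latest 'turn' covering them, with a running count of those that end lit) and a toggle-parity set for still-undecided cells, returning count + len(parity set); A simulates forward, mutating a dense 1000x1000 boolean grid cell by cell and summing it at the end.
-- outside the precondition, e.g. on part1(['turn on -1,0 through -1,0', 'turn on 999,0 through 999,0']): A returns 1, B returns 2
import Mathlib
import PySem

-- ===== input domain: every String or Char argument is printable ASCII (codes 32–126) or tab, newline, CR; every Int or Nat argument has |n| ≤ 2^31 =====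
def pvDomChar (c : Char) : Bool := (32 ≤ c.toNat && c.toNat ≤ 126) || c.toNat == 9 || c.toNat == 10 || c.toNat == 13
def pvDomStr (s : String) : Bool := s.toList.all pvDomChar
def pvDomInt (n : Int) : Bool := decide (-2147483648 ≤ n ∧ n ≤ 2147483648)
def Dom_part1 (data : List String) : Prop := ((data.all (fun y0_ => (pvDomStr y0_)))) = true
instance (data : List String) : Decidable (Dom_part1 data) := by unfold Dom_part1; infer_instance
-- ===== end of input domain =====

-- B replaces A's forward simulation of a dense 1000x1000 boolean grid by a single
-- last-writer-wins sweep over the parsed instructions in REVERSE order, keeping a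
-- decided-set with a running lit count plus a toggle-parity set for undecided cells.

-- shared low-level helpers: 'x, y = map(int, p.split(","))' and the rectangle double loop
-- '(x, y) for x in range(x1, x2+1) for y in range(y1, y2+1)' (both Pythons contain them verbatim)
def pyIntPair? (p : String) : Option (Int × Int) :=
  match PySem.Str.split? p "," with
  | some [a, b] =>
    match PySem.Int.ofStr? a, PySem.Int.ofStr? b with
    | some x, some y => some (x, y)
    | _, _ => none
  | _ => none

def pvRect (x1 y1 x2 y2 : Int) : List (Int × Int) :=
  (PySem.List.pyRange x1 (x2 + 1) 1).flatMap
    (fun x => (PySem.List.pyRange y1 (y2 + 1) 1).map (fun y => (x, y)))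

-- ===== PORT A =====
-- 'ranges(rest)' as the list of produced (x, y) pairs; none = the ValueError A raises (excluded by Pre_)
def rangesA (rest : List String) : Option (List (Int × Int)) :=
  match rest with
  | [p1, _, p2] =>
    match pyIntPair? p1, pyIntPair? p2 with
    | some (x1, y1), some (x2, y2) => some (pvRect x1 y1 x2 y2)
    | _, _ => none
  | _ => none

-- grid[x][y] = b / read grid[x][y]; exact for 0 ≤ x, y ≤ 999 (guaranteed by Pre_; Pre_ excludes
-- Python's negative-index wraparound and the out-of-range IndexError)
def setCell (g : List (List Bool)) (x y : Int) (b : Bool) : List (List Bool) :=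
  g.set x.toNat ((g.getD x.toNat []).set y.toNat b)
def getCell (g : List (List Bool)) (x y : Int) : Bool :=
  (g.getD x.toNat []).getD y.toNat false

def part1 (data : List String) : Int :=
  let grid : List (List Bool) := List.replicate 1000 (List.replicate 1000 false)
  let grid := data.foldl (fun g l =>
    match PySem.Str.split₀ l with
    | "turn" :: on_off :: rest =>
      let on := on_off == "on"
      match rangesA rest with
      | some cells => cells.foldl (fun g' c => setCell g' c.1 c.2 on) g
      | none => g
    | "toggle" :: rest =>
      match rangesA rest with
      | some cells => cells.foldl (fun g' c => setCell g' c.1 c.2 (!getCell g' c.1 c.2)) g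
      | none => g
    | _ => g) grid
  ((grid.flatMap id).count true : Int)

-- ===== PORT B =====
-- parse_line(l): None for lines no instruction pattern matches; int-parse failures (where
-- Python raises, excluded by Pre_) are also mapped to none
def parseLineB (l : String) : Option (String × Int × Int × Int × Int) :=
  let parts := PySem.Str.split₀ l
  let hd : Option (String × List String) :=
    if parts.take 1 = ["turn"] ∧ 2 ≤ parts.length then
      some ((if parts.getD 1 "" = "on" then "on" else "off"), parts.drop 2)
    else if parts.take 1 = ["toggle"] then some ("toggle", parts.drop 1)
    else none
  match hd with
  | none => none
  | some (op, rest) =>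
    match pyIntPair? (rest.getD 0 ""), pyIntPair? (rest.getD 2 "") with
    | some (x1, y1), some (x2, y2) => some (op, x1, y1, x2, y2)
    | _, _ => none

-- the body of B's innermost loop: state = (decided, flip, count)
def cellStepB (op : String)
    (st : PySem.Set (Int × Int) × PySem.Set (Int × Int) × Int) (c : Int × Int) :
    PySem.Set (Int × Int) × PySem.Set (Int × Int) × Int :=
  if c ∈ st.1 then st
  else if op = "toggle" then
    if c ∈ st.2.1 then (st.1, PySem.Set.discard st.2.1 c, st.2.2)   -- flip.remove(c) with c ∈ flip = discard
    else (st.1, PySem.Set.add st.2.1 c, st.2.2)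
  else
    (PySem.Set.add st.1 c, PySem.Set.discard st.2.1 c,
      if ¬((op = "on") ↔ (c ∈ st.2.1)) then st.2.2 + 1 else st.2.2)

def instrStepB (st : PySem.Set (Int × Int) × PySem.Set (Int × Int) × Int)
    (i : String × Int × Int × Int × Int) :
    PySem.Set (Int × Int) × PySem.Set (Int × Int) × Int :=
  (pvRect i.2.1 i.2.2.1 i.2.2.2.1 i.2.2.2.2).foldl (cellStepB i.1) st

def part1_alt (data : List String) : Int :=
  let instrs := data.filterMap parseLineB
  let st := instrs.reverse.foldl instrStepB
    ((PySem.Set.empty : PySem.Set (Int × Int)), (PySem.Set.empty : PySem.Set (Int × Int)), (0 : Int))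
  st.2.2 + PySem.Set.len st.2.1

-- ===== PRECONDITION & SPEC =====
def pvRestOK (rest : List String) : Bool :=
  match rest with
  | [p1, _, p2] =>
    match pyIntPair? p1, pyIntPair? p2 with
    | some (x1, y1), some (x2, y2) =>
      decide (0 ≤ x1 ∧ x1 ≤ 999 ∧ 0 ≤ y1 ∧ y1 ≤ 999 ∧ 0 ≤ x2 ∧ x2 ≤ 999 ∧ 0 ≤ y2 ∧ y2 ≤ 999)
    | _, _ => false
  | _ => false

def pvLineOK (l : String) : Bool :=
  match PySem.Str.split₀ l with
  | [] => true
  | t :: rest =>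
    if t = "toggle" then pvRestOK rest
    else if t = "turn" then
      match rest with
      | _ :: rest' => pvRestOK rest'
      | [] => true
    else true

-- Pre_ excludes matching instructions whose coordinate part is malformed or out of the 1000x1000
-- grid: there A raises (ValueError / IndexError), except for coordinates in [-1000,-1], where A's
-- value comes from Python's negative-index wraparound aliasing row/column -k with 1000-k — an
-- accident of the dense-list representation which the coordinate view does not share.
def Pre_part1 (data : List String) : Prop := ∀ l ∈ data, pvLineOK l = true
instance (data : List String) : Decidable (Pre_part1 data) := by unfold Pre_part1; infer_instance

def pvWitness_part1 : List String :=
  ["turn on 0,0 through 2,2", "toggle 1,1 through 3,1", "turn off 2,0 through 2,999", "xyz"]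

def Spec_part1 (data : List String) (out : Int) : Prop := out = part1_alt data
instance (data : List String) (out : Int) : Decidable (Spec_part1 data out) := by unfold Spec_part1; infer_instance

-- ===== CLAIM (what is proved, stated in full; the proofs are below) =====
def Claim_equal_part1 : Prop := ∀ (data : List String), Dom_part1 data → Pre_part1 data → Spec_part1 data (part1 data)

-- ===== LEMMAS AND PROOFS =====

theorem part1_witness_ok : Dom_part1 pvWitness_part1 ∧ Pre_part1 pvWitness_part1 := by
  constructor
  · decide
  · decide

-- the loop body of part1's fold, named for the proofs (definitionally the lambda in part1)
def stepA (g : List (List Bool)) (l : String) : List (List Bool) :=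
  match PySem.Str.split₀ l with
  | "turn" :: on_off :: rest =>
    let on := on_off == "on"
    match rangesA rest with
    | some cells => cells.foldl (fun g' c => setCell g' c.1 c.2 on) g
    | none => g
  | "toggle" :: rest =>
    match rangesA rest with
    | some cells => cells.foldl (fun g' c => setCell g' c.1 c.2 (!getCell g' c.1 c.2)) g
    | none => g
  | _ => g

-- a parsed instruction applied to A's grid
def applyInstr (g : List (List Bool)) (i : String × Int × Int × Int × Int) : List (List Bool) :=
  if i.1 = "toggle" then
    (pvRect i.2.1 i.2.2.1 i.2.2.2.1 i.2.2.2.2).foldl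
      (fun g' c => setCell g' c.1 c.2 (!getCell g' c.1 c.2)) g
  else
    (pvRect i.2.1 i.2.2.1 i.2.2.2.1 i.2.2.2.2).foldl
      (fun g' c => setCell g' c.1 c.2 (i.1 == "on")) g

-- per-cell semantics of one instruction
def cellSem (c : Int × Int) (b : Bool) (i : String × Int × Int × Int × Int) : Bool :=
  if c ∈ pvRect i.2.1 i.2.2.1 i.2.2.2.1 i.2.2.2.2 then
    (if i.1 = "toggle" then !b else (i.1 == "on"))
  else b

def instrOK (i : String × Int × Int × Int × Int) : Prop :=
  0 ≤ i.2.1 ∧ i.2.1 ≤ 999 ∧ 0 ≤ i.2.2.1 ∧ i.2.2.1 ≤ 999 ∧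
  0 ≤ i.2.2.2.1 ∧ i.2.2.2.1 ≤ 999 ∧ 0 ≤ i.2.2.2.2 ∧ i.2.2.2.2 ≤ 999

def pvInR (p : Int × Int) : Prop := 0 ≤ p.1 ∧ p.1 ≤ 999 ∧ 0 ≤ p.2 ∧ p.2 ≤ 999

def pvWF (g : List (List Bool)) : Prop := g.length = 1000 ∧ ∀ r ∈ g, r.length = 1000

theorem pvRect_eq (x1 y1 x2 y2 : Int) :
    pvRect x1 y1 x2 y2 = (PySem.List.pyRange x1 (x2 + 1) 1).product (PySem.List.pyRange y1 (y2 + 1) 1) := rfl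

theorem pvMem_rect {x1 y1 x2 y2 : Int} {p : Int × Int} :
    p ∈ pvRect x1 y1 x2 y2 ↔ x1 ≤ p.1 ∧ p.1 ≤ x2 ∧ y1 ≤ p.2 ∧ p.2 ≤ y2 := by
  obtain ⟨x, y⟩ := p
  rw [pvRect_eq]
  simp only [List.pair_mem_product, PySem.List.mem_pyRange_one]
  omega

theorem pvNodup_rect (x1 y1 x2 y2 : Int) : (pvRect x1 y1 x2 y2).Nodup := by
  rw [pvRect_eq]
  exact List.Nodup.product (PySem.List.nodup_pyRange_one _ _) (PySem.List.nodup_pyRange_one _ _)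

theorem pvRectInR {x1 y1 x2 y2 : Int}
    (hb : 0 ≤ x1 ∧ x1 ≤ 999 ∧ 0 ≤ y1 ∧ y1 ≤ 999 ∧ 0 ≤ x2 ∧ x2 ≤ 999 ∧ 0 ≤ y2 ∧ y2 ≤ 999) :
    ∀ c ∈ pvRect x1 y1 x2 y2, pvInR c := by
  intro c hc
  have := pvMem_rect.mp hc
  exact ⟨by omega, by omega, by omega, by omega⟩

theorem pvRow_len {g : List (List Bool)} (hg : pvWF g) {x : Int} (hx : 0 ≤ x ∧ x ≤ 999) :
    (g.getD x.toNat []).length = 1000 := by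
  obtain ⟨hl, hr⟩ := hg
  have hlt : x.toNat < g.length := by omega
  rw [List.getD_eq_getElem _ _ hlt]
  exact hr _ (List.getElem_mem hlt)

theorem pvGetD_set_self {α : Type} (l : List α) (i : Nat) (h : i < l.length) (a : α) (d : α) :
    (l.set i a).getD i d = a := by
  rw [List.getD_eq_getElem?_getD, List.getElem?_set, if_pos rfl, if_pos h]
  rfl

theorem pvGetD_set_ne {α : Type} (l : List α) {i j : Nat} (h : i ≠ j) (a : α) (d : α) :
    (l.set i a).getD j d = l.getD j d := by
  rw [List.getD_eq_getElem?_getD, List.getElem?_set, if_neg h, ← List.getD_eq_getElem?_getD]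

theorem pvWF_setCell {g : List (List Bool)} (hg : pvWF g) {x y : Int}
    (hx : 0 ≤ x ∧ x ≤ 999) (hy : 0 ≤ y ∧ y ≤ 999) (b : Bool) : pvWF (setCell g x y b) := by
  obtain ⟨hl, hr⟩ := hg
  refine ⟨by simp [setCell, hl], ?_⟩
  intro r hrm
  rcases List.mem_or_eq_of_mem_set hrm with h | h
  · exact hr r h
  · subst h
    rw [List.length_set]
    exact pvRow_len ⟨hl, hr⟩ hx

theorem pvGetCell_setCell {g : List (List Bool)} (hg : pvWF g) {a b x y : Int}
    (ha : 0 ≤ a ∧ a ≤ 999) (hb : 0 ≤ b ∧ b ≤ 999)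
    (hx : 0 ≤ x ∧ x ≤ 999) (hy : 0 ≤ y ∧ y ≤ 999) (v : Bool) :
    getCell (setCell g a b v) x y = if x = a ∧ y = b then v else getCell g x y := by
  have hga : a.toNat < g.length := by obtain ⟨hl, _⟩ := hg; omega
  have hrow : (g.getD a.toNat []).length = 1000 := pvRow_len hg ha
  unfold getCell setCell
  by_cases hxa : x = a
  · subst hxa
    rw [pvGetD_set_self g x.toNat hga]
    by_cases hyb : y = b
    · subst hyb
      rw [pvGetD_set_self _ y.toNat (by omega), if_pos ⟨rfl, rfl⟩]
    · have hne : b.toNat ≠ y.toNat := by omega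
      rw [pvGetD_set_ne _ hne, if_neg (by tauto)]
  · have hne : a.toNat ≠ x.toNat := by omega
    rw [pvGetD_set_ne g hne, if_neg (by tauto)]

theorem pvFoldl_const (b : Bool) (cells : List (Int × Int)) :
    ∀ g : List (List Bool), pvWF g → (∀ c ∈ cells, pvInR c) →
      pvWF (cells.foldl (fun g' c => setCell g' c.1 c.2 b) g) ∧
      ∀ p : Int × Int, pvInR p →
        getCell (cells.foldl (fun g' c => setCell g' c.1 c.2 b) g) p.1 p.2 =
          if p ∈ cells then b else getCell g p.1 p.2 := by
  induction cells with
  | nil => intro g hg _; exact ⟨hg, fun p _ => by simp⟩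
  | cons c cs ih =>
    intro g hg hc
    have hcInR : pvInR c := hc c (by simp)
    have hg1 : pvWF (setCell g c.1 c.2 b) :=
      pvWF_setCell hg ⟨hcInR.1, hcInR.2.1⟩ ⟨hcInR.2.2.1, hcInR.2.2.2⟩ b
    obtain ⟨hwf, hget⟩ := ih (setCell g c.1 c.2 b) hg1 (fun d hd => hc d (by simp [hd]))
    refine ⟨by simpa using hwf, ?_⟩
    intro p hp
    simp only [List.foldl_cons]
    rw [hget p hp, pvGetCell_setCell hg ⟨hcInR.1, hcInR.2.1⟩ ⟨hcInR.2.2.1, hcInR.2.2.2⟩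
      ⟨hp.1, hp.2.1⟩ ⟨hp.2.2.1, hp.2.2.2⟩ b]
    by_cases h1 : p ∈ cs
    · simp [h1]
    · by_cases h2 : p = c
      · have he : p.1 = c.1 ∧ p.2 = c.2 := Prod.ext_iff.mp h2
        simp [h1, h2, he]
      · have hne : ¬(p.1 = c.1 ∧ p.2 = c.2) := fun h => h2 (Prod.ext_iff.mpr h)
        simp [h1, h2, hne]

theorem pvFoldl_toggle (cells : List (Int × Int)) :
    ∀ g : List (List Bool), pvWF g → (∀ c ∈ cells, pvInR c) → cells.Nodup →
      pvWF (cells.foldl (fun g' c => setCell g' c.1 c.2 (!getCell g' c.1 c.2)) g) ∧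
      ∀ p : Int × Int, pvInR p →
        getCell (cells.foldl (fun g' c => setCell g' c.1 c.2 (!getCell g' c.1 c.2)) g) p.1 p.2 =
          if p ∈ cells then !getCell g p.1 p.2 else getCell g p.1 p.2 := by
  induction cells with
  | nil => intro g hg _ _; exact ⟨hg, fun p _ => by simp⟩
  | cons c cs ih =>
    intro g hg hc hnd
    have hcInR : pvInR c := hc c (by simp)
    have hcd : c ∉ cs := (List.nodup_cons.mp hnd).1
    set g1 := setCell g c.1 c.2 (!getCell g c.1 c.2) with hg1def
    have hg1 : pvWF g1 :=
      pvWF_setCell hg ⟨hcInR.1, hcInR.2.1⟩ ⟨hcInR.2.2.1, hcInR.2.2.2⟩ _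
    obtain ⟨hwf, hget⟩ := ih g1 hg1 (fun d hd => hc d (by simp [hd])) (List.nodup_cons.mp hnd).2
    refine ⟨by simpa using hwf, ?_⟩
    intro p hp
    have hstep : getCell g1 p.1 p.2 =
        if p.1 = c.1 ∧ p.2 = c.2 then !getCell g c.1 c.2 else getCell g p.1 p.2 :=
      pvGetCell_setCell hg ⟨hcInR.1, hcInR.2.1⟩ ⟨hcInR.2.2.1, hcInR.2.2.2⟩
        ⟨hp.1, hp.2.1⟩ ⟨hp.2.2.1, hp.2.2.2⟩ _
    simp only [List.foldl_cons, ← hg1def]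
    rw [hget p hp]
    by_cases h1 : p ∈ cs
    · have hpc : ¬(p.1 = c.1 ∧ p.2 = c.2) := fun h => hcd (Prod.ext_iff.mpr h ▸ h1)
      rw [if_pos h1, if_pos (by simp [h1]), hstep, if_neg hpc]
    · by_cases h2 : p = c
      · have he : p.1 = c.1 ∧ p.2 = c.2 := Prod.ext_iff.mp h2
        rw [if_neg h1, if_pos (by simp [h2]), hstep, if_pos he, h2]
      · have hne : ¬(p.1 = c.1 ∧ p.2 = c.2) := fun h => h2 (Prod.ext_iff.mpr h)
        rw [if_neg h1, if_neg (by simp [h1, h2]), hstep, if_neg hne]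

-- one instruction on the grid, seen per cell
theorem pvApplyInstr_cell {i : String × Int × Int × Int × Int} (hi : instrOK i)
    {g : List (List Bool)} (hg : pvWF g) :
    pvWF (applyInstr g i) ∧
      ∀ c : Int × Int, pvInR c → getCell (applyInstr g i) c.1 c.2 = cellSem c (getCell g c.1 c.2) i := by
  obtain ⟨op, x1, y1, x2, y2⟩ := i
  have hr : ∀ c ∈ pvRect x1 y1 x2 y2, pvInR c := pvRectInR hi
  unfold applyInstr cellSem
  by_cases hop : op = "toggle"
  · simp only [if_pos hop]
    obtain ⟨hwf, hget⟩ := pvFoldl_toggle (pvRect x1 y1 x2 y2) g hg hr (pvNodup_rect x1 y1 x2 y2)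
    refine ⟨hwf, fun c hc => ?_⟩
    rw [hget c hc]
  · simp only [if_neg hop]
    obtain ⟨hwf, hget⟩ := pvFoldl_const (op == "on") (pvRect x1 y1 x2 y2) g hg hr
    refine ⟨hwf, fun c hc => ?_⟩
    rw [hget c hc]

-- the whole fold of parsed instructions on the grid, seen per cell
theorem pvFoldInstr_cell (I : List (String × Int × Int × Int × Int)) :
    ∀ g : List (List Bool), (∀ i ∈ I, instrOK i) → pvWF g →
      pvWF (I.foldl applyInstr g) ∧
      ∀ c : Int × Int, pvInR c →
        getCell (I.foldl applyInstr g) c.1 c.2 = I.foldl (cellSem c) (getCell g c.1 c.2) := by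
  induction I with
  | nil => intro g _ hg; exact ⟨hg, fun c _ => rfl⟩
  | cons i is ih =>
    intro g hI hg
    obtain ⟨hwf1, hget1⟩ := pvApplyInstr_cell (hI i (by simp)) hg
    obtain ⟨hwf, hget⟩ := ih (applyInstr g i) (fun j hj => hI j (by simp [hj])) hwf1
    refine ⟨hwf, fun c hc => ?_⟩
    simp only [List.foldl_cons]
    rw [hget c hc, hget1 c hc]

-- bridge: under pvLineOK, A's loop body is applyInstr of B's parse
theorem pvBridge (l : String) (hl : pvLineOK l = true) (g : List (List Bool)) :
    stepA g l = (match parseLineB l with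
      | some i => applyInstr g i
      | none => g) := by
  unfold stepA
  split
  · rename_i on_off rest heq
    simp only [pvLineOK, heq] at hl
    norm_num at hl
    rcases rest with _ | ⟨p1, _ | ⟨q, _ | ⟨p2, _ | ⟨r4, rest4⟩⟩⟩⟩
    · simp [pvRestOK] at hl
    · simp [pvRestOK] at hl
    · simp [pvRestOK] at hl
    · cases h1 : pyIntPair? p1 with
      | none => simp [pvRestOK, h1] at hl
      | some xy1 =>
        cases h2 : pyIntPair? p2 with
        | none => simp [pvRestOK, h1, h2] at hl
        | some xy2 =>
          obtain ⟨x1, y1⟩ := xy1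
          obtain ⟨x2, y2⟩ := xy2
          have hra : rangesA [p1, q, p2] = some (pvRect x1 y1 x2 y2) := by
            simp [rangesA, h1, h2]
          simp only [hra]
          have hp : parseLineB l
              = some ((if on_off = "on" then "on" else "off"), x1, y1, x2, y2) := by
            simp [parseLineB, heq, h1, h2, List.getD]
          rw [hp]
          by_cases ho : on_off = "on"
          · subst ho
            simp [applyInstr]
          · have hbeq : (on_off == "on") = false := by simp [ho]
            rw [hbeq, if_neg ho]
            have h1' : ("off" : String) ≠ "toggle" := by decide
            have h2' : (("off" : String) == "on") = false := by decide
            show _ = applyInstr g ("off", x1, y1, x2, y2)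
            unfold applyInstr
            rw [if_neg h1']
            simp only [h2']
    · simp [pvRestOK] at hl
  · rename_i rest heq
    simp only [pvLineOK, heq] at hl
    norm_num at hl
    rcases rest with _ | ⟨p1, _ | ⟨q, _ | ⟨p2, _ | ⟨r4, rest4⟩⟩⟩⟩
    · simp [pvRestOK] at hl
    · simp [pvRestOK] at hl
    · simp [pvRestOK] at hl
    · cases h1 : pyIntPair? p1 with
      | none => simp [pvRestOK, h1] at hl
      | some xy1 =>
        cases h2 : pyIntPair? p2 with
        | none => simp [pvRestOK, h1, h2] at hl
        | some xy2 =>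
          obtain ⟨x1, y1⟩ := xy1
          obtain ⟨x2, y2⟩ := xy2
          have hra : rangesA [p1, q, p2] = some (pvRect x1 y1 x2 y2) := by
            simp [rangesA, h1, h2]
          simp only [hra]
          have hp : parseLineB l = some ("toggle", x1, y1, x2, y2) := by
            simp [parseLineB, heq, h1, h2, List.getD]
          rw [hp]
          have h1' : ("toggle" : String) = "toggle" := rfl
          show _ = applyInstr g ("toggle", x1, y1, x2, y2)
          unfold applyInstr
          rw [if_pos h1']
    · simp [pvRestOK] at hl
  · rename_i hne1 hne2
    have hp : parseLineB l = none := by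
      cases hsp : PySem.Str.split₀ l with
      | nil => simp [parseLineB, hsp]
      | cons t ps =>
        by_cases ht : t = "turn"
        · subst ht
          cases ps with
          | nil => simp [parseLineB, hsp]
          | cons o r => exact absurd hsp (fun h => hne1 o r h)
        · by_cases htog : t = "toggle"
          · subst htog
            exact absurd hsp (fun h => hne2 ps h)
          · simp [parseLineB, hsp, ht, htog]
    rw [hp]

theorem pvParseOK (l : String) (hl : pvLineOK l = true)
    (i : String × Int × Int × Int × Int) (hp : parseLineB l = some i) : instrOK i := by
  unfold pvLineOK at hl
  cases hsp : PySem.Str.split₀ l with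
  | nil => simp [parseLineB, hsp] at hp
  | cons t ps =>
    rw [hsp] at hl
    by_cases ht : t = "turn"
    · subst ht
      norm_num at hl
      cases ps with
      | nil => simp [parseLineB, hsp] at hp
      | cons o rest =>
        rcases rest with _ | ⟨p1, _ | ⟨q, _ | ⟨p2, _ | ⟨r4, rest4⟩⟩⟩⟩
        · simp [pvRestOK] at hl
        · simp [pvRestOK] at hl
        · simp [pvRestOK] at hl
        · cases h1 : pyIntPair? p1 with
          | none => simp [pvRestOK, h1] at hl
          | some xy1 =>
            cases h2 : pyIntPair? p2 with
            | none => simp [pvRestOK, h1, h2] at hl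
            | some xy2 =>
              obtain ⟨x1, y1⟩ := xy1
              obtain ⟨x2, y2⟩ := xy2
              simp [pvRestOK, h1, h2] at hl
              simp [parseLineB, hsp, h1, h2, List.getD] at hp
              rw [← hp]
              unfold instrOK
              refine ⟨?_, ?_, ?_, ?_, ?_, ?_, ?_, ?_⟩ <;> simp <;> omega
        · simp [pvRestOK] at hl
    · by_cases htog : t = "toggle"
      · subst htog
        norm_num at hl
        rcases ps with _ | ⟨p1, _ | ⟨q, _ | ⟨p2, _ | ⟨r4, rest4⟩⟩⟩⟩
        · simp [pvRestOK] at hl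
        · simp [pvRestOK] at hl
        · simp [pvRestOK] at hl
        · cases h1 : pyIntPair? p1 with
          | none => simp [pvRestOK, h1] at hl
          | some xy1 =>
            cases h2 : pyIntPair? p2 with
            | none => simp [pvRestOK, h1, h2] at hl
            | some xy2 =>
              obtain ⟨x1, y1⟩ := xy1
              obtain ⟨x2, y2⟩ := xy2
              simp [pvRestOK, h1, h2] at hl
              simp [parseLineB, hsp, h1, h2, List.getD] at hp
              rw [← hp]
              unfold instrOK
              refine ⟨?_, ?_, ?_, ?_, ?_, ?_, ?_, ?_⟩ <;> simp <;> omega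
        · simp [pvRestOK] at hl
      · simp [parseLineB, hsp, ht, htog] at hp

theorem pvFoldA (data : List String) (hpre : ∀ l ∈ data, pvLineOK l = true) :
    ∀ g : List (List Bool),
      data.foldl stepA g = (data.filterMap parseLineB).foldl applyInstr g := by
  induction data with
  | nil => intro g; rfl
  | cons l ls ih =>
    intro g
    have hbr := pvBridge l (hpre l (by simp)) g
    have ih' := ih (fun l' h' => hpre l' (by simp [h']))
    cases hp : parseLineB l with
    | none =>
      simp only [List.foldl_cons, List.filterMap_cons, hp]
      rw [show stepA g l = g by rw [hbr, hp], ih']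
    | some i =>
      simp only [List.foldl_cons, List.filterMap_cons, hp]
      rw [show stepA g l = applyInstr g i by rw [hbr, hp], ih']

-- ===== B-side invariant =====
def pvRel (T : (Int × Int) → Bool → Bool)
    (st : PySem.Set (Int × Int) × PySem.Set (Int × Int) × Int) : Prop :=
  st.1.Nodup ∧ st.2.1.Nodup ∧ (∀ c ∈ st.2.1, c ∉ st.1) ∧
  (∀ c ∈ st.1, pvInR c) ∧ (∀ c ∈ st.2.1, pvInR c) ∧
  ∃ v : (Int × Int) → Bool,
    st.2.2 = ((st.1.filter v).length : Int) ∧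
    ∀ c, pvInR c → ∀ b, T c b = if c ∈ st.1 then v c else (if c ∈ st.2.1 then !b else b)

-- inner induction: the per-cell loop over the rect cells
theorem pvInner (op : String) (T0 T1 : (Int × Int) → Bool → Bool) :
    ∀ (cs : List (Int × Int)) (st : PySem.Set (Int × Int) × PySem.Set (Int × Int) × Int),
      cs.Nodup → (∀ c ∈ cs, pvInR c) →
      (∀ c ∈ cs, ∀ b, T1 c b = T0 c (if op = "toggle" then !b else (op == "on"))) →
      pvRel (fun c b => if c ∈ cs then T0 c b else T1 c b) st →
      pvRel T1 (cs.foldl (cellStepB op) st) := by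
  intro cs
  induction cs with
  | nil =>
    intro st _ _ _ h
    obtain ⟨h1, h2, h3, h4, h5, v, hcnt, hT⟩ := h
    exact ⟨h1, h2, h3, h4, h5, v, hcnt, fun c hcR b => by simpa using hT c hcR b⟩
  | cons c0 cs ih =>
    intro st hnd hinr hact h
    obtain ⟨hc0cs, hcsnd⟩ := List.nodup_cons.mp hnd
    obtain ⟨h1, h2, h3, h4, h5, v, hcnt, hT⟩ := h
    have hc0R : pvInR c0 := hinr c0 (by simp)
    simp only [List.foldl_cons]
    apply ih _ hcsnd (fun c hc => hinr c (by simp [hc])) (fun c hc b => hact c (by simp [hc]) b)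
    by_cases hd0 : c0 ∈ st.1
    · -- already decided: state unchanged
      have hstep : cellStepB op st c0 = st := by unfold cellStepB; rw [if_pos hd0]
      rw [hstep]
      refine ⟨h1, h2, h3, h4, h5, v, hcnt, ?_⟩
      intro c hcR b
      beta_reduce
      by_cases hcc : c ∈ cs
      · rw [if_pos hcc]
        have := hT c hcR b
        beta_reduce at this
        rwa [if_pos (by simp [hcc])] at this
      · rw [if_neg hcc]
        by_cases hcc0 : c = c0
        · subst hcc0
          rw [hact c (by simp) b]
          have := hT c hcR (if op = "toggle" then !b else (op == "on"))
          beta_reduce at this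
          rw [if_pos (by simp)] at this
          rw [this, if_pos hd0, if_pos hd0]
        · have := hT c hcR b
          beta_reduce at this
          rwa [if_neg (by simp [hcc, hcc0])] at this
    · by_cases htog : op = "toggle"
      · -- toggle an undecided cell: flip its parity-set membership
        by_cases hf0 : c0 ∈ st.2.1
        · have hstep : cellStepB op st c0 = (st.1, PySem.Set.discard st.2.1 c0, st.2.2) := by
            unfold cellStepB
            rw [if_neg hd0, if_pos htog, if_pos hf0]
          rw [hstep]
          refine ⟨h1, PySem.Set.nodup_discard _ _ h2, ?_, h4, ?_, v, hcnt, ?_⟩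
          · intro c hc
            exact h3 c ((PySem.Set.mem_discard _ _ _).mp hc).1
          · intro c hc
            exact h5 c ((PySem.Set.mem_discard _ _ _).mp hc).1
          · intro c hcR b
            beta_reduce
            by_cases hcc0 : c = c0
            · subst hcc0
              rw [if_neg (by intro hx; exact hc0cs hx)]
              rw [hact c (by simp) b, if_pos htog]
              have := hT c hcR (!b)
              beta_reduce at this
              rw [if_pos (by simp)] at this
              rw [this, if_neg hd0, if_pos hf0, if_neg hd0,
                if_neg (fun hx => ((PySem.Set.mem_discard _ _ _).mp hx).2 rfl)]
              simp
            · have hmem : c ∈ PySem.Set.discard st.2.1 c0 ↔ c ∈ st.2.1 :=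
                ⟨fun hx => ((PySem.Set.mem_discard _ _ _).mp hx).1,
                 fun hx => (PySem.Set.mem_discard _ _ _).mpr ⟨hx, hcc0⟩⟩
              by_cases hcc : c ∈ cs
              · rw [if_pos hcc]
                have := hT c hcR b
                beta_reduce at this
                rw [if_pos (by simp [hcc])] at this
                rw [this]
                simp only [hmem]
              · rw [if_neg hcc]
                have := hT c hcR b
                beta_reduce at this
                rw [if_neg (by simp [hcc, hcc0])] at this
                rw [this]
                simp only [hmem]
        · have hstep : cellStepB op st c0 = (st.1, PySem.Set.add st.2.1 c0, st.2.2) := by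
            unfold cellStepB
            rw [if_neg hd0, if_pos htog, if_neg hf0]
          rw [hstep]
          refine ⟨h1, PySem.Set.nodup_add _ _ h2, ?_, h4, ?_, v, hcnt, ?_⟩
          · intro c hc
            rcases (PySem.Set.mem_add _ _ _).mp hc with hx | hx
            · exact h3 c hx
            · subst hx; exact hd0
          · intro c hc
            rcases (PySem.Set.mem_add _ _ _).mp hc with hx | hx
            · exact h5 c hx
            · subst hx; exact hc0R
          · intro c hcR b
            beta_reduce
            by_cases hcc0 : c = c0
            · subst hcc0
              rw [if_neg (by intro hx; exact hc0cs hx)]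
              rw [hact c (by simp) b, if_pos htog]
              have := hT c hcR (!b)
              beta_reduce at this
              rw [if_pos (by simp)] at this
              rw [this, if_neg hd0, if_neg hf0, if_neg hd0,
                if_pos ((PySem.Set.mem_add _ _ _).mpr (Or.inr rfl))]
            · have hmem : c ∈ PySem.Set.add st.2.1 c0 ↔ c ∈ st.2.1 := by
                rw [PySem.Set.mem_add]
                exact ⟨fun hx => hx.resolve_right hcc0, Or.inl⟩
              by_cases hcc : c ∈ cs
              · rw [if_pos hcc]
                have := hT c hcR b
                beta_reduce at this
                rw [if_pos (by simp [hcc])] at this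
                rw [this]
                simp only [hmem]
              · rw [if_neg hcc]
                have := hT c hcR b
                beta_reduce at this
                rw [if_neg (by simp [hcc, hcc0])] at this
                rw [this]
                simp only [hmem]
      · -- a 'turn' decides the cell
        have hstep : cellStepB op st c0 = (PySem.Set.add st.1 c0, PySem.Set.discard st.2.1 c0,
            if ¬((op = "on") ↔ (c0 ∈ st.2.1)) then st.2.2 + 1 else st.2.2) := by
          unfold cellStepB
          rw [if_neg hd0, if_neg htog]
        rw [hstep]
        have hdadd : PySem.Set.add st.1 c0 = st.1 ++ [c0] := PySem.Set.add_of_not_mem hd0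
        set newval : Bool := if c0 ∈ st.2.1 then !(op == "on") else (op == "on") with hnewval
        refine ⟨?_, PySem.Set.nodup_discard _ _ h2, ?_, ?_, ?_,
          (fun c => if c = c0 then newval else v c), ?_, ?_⟩
        · exact PySem.Set.nodup_add _ _ h1
        · intro c hc
          obtain ⟨hcf, hne⟩ := (PySem.Set.mem_discard _ _ _).mp hc
          rw [hdadd, List.mem_append]
          rintro (hx | hx)
          · exact h3 c hcf hx
          · exact hne (by simpa using hx)
        · intro c hc
          rcases (PySem.Set.mem_add _ _ _).mp hc with hx | hx
          · exact h4 c hx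
          · subst hx; exact hc0R
        · intro c hc
          exact h5 c ((PySem.Set.mem_discard _ _ _).mp hc).1
        · -- the count
          rw [hdadd, List.filter_append]
          have hfiltv : st.1.filter (fun c => if c = c0 then newval else v c) = st.1.filter v := by
            apply List.filter_congr
            intro c hc
            rw [if_neg (by rintro rfl; exact hd0 hc)]
          have hone : List.filter (fun c => if c = c0 then newval else v c) [c0]
              = if newval then [c0] else [] := by
            rcases Bool.eq_false_or_eq_true newval with hb | hb <;> simp [List.filter, hb]
          rw [hfiltv, hone]
          have hnv : (¬((op = "on") ↔ (c0 ∈ st.2.1))) ↔ newval = true := by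
            by_cases ho : op = "on" <;> by_cases hf0 : c0 ∈ st.2.1 <;>
              simp [hnewval, ho, hf0]
          by_cases hb : newval = true
          · rw [if_pos (hnv.mpr hb), hb, hcnt]
            simp
          · have hb' : newval = false := by simpa using hb
            rw [if_neg (fun hc => hb (hnv.mp hc)), hb', hcnt]
            simp
        · intro c hcR b
          beta_reduce
          by_cases hcc0 : c = c0
          · subst hcc0
            rw [if_neg (by intro hx; exact hc0cs hx)]
            rw [hact c (by simp) b, if_neg htog]
            have := hT c hcR (op == "on")
            beta_reduce at this
            rw [if_pos (by simp)] at this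
            rw [this, if_neg hd0,
              if_pos ((PySem.Set.mem_add _ _ _).mpr (Or.inr rfl)), if_pos rfl]
          · have hmemd : c ∈ PySem.Set.add st.1 c0 ↔ c ∈ st.1 := by
              rw [PySem.Set.mem_add]
              exact ⟨fun hx => hx.resolve_right hcc0, Or.inl⟩
            have hmemf : c ∈ PySem.Set.discard st.2.1 c0 ↔ c ∈ st.2.1 :=
              ⟨fun hx => ((PySem.Set.mem_discard _ _ _).mp hx).1,
               fun hx => (PySem.Set.mem_discard _ _ _).mpr ⟨hx, hcc0⟩⟩
            have hval : (if c = c0 then newval else v c) = v c := if_neg hcc0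
            by_cases hcc : c ∈ cs
            · rw [if_pos hcc]
              have := hT c hcR b
              beta_reduce at this
              rw [if_pos (by simp [hcc])] at this
              rw [this]
              by_cases hcd : c ∈ st.1
              · rw [if_pos hcd, if_pos (hmemd.mpr hcd), hval]
              · rw [if_neg hcd, if_neg (fun h => hcd (hmemd.mp h))]
                simp only [hmemf]
            · rw [if_neg hcc]
              have := hT c hcR b
              beta_reduce at this
              rw [if_neg (by simp [hcc, hcc0])] at this
              rw [this]
              by_cases hcd : c ∈ st.1
              · rw [if_pos hcd, if_pos (hmemd.mpr hcd), hval]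
              · rw [if_neg hcd, if_neg (fun h => hcd (hmemd.mp h))]
                simp only [hmemf]

theorem pvOuterStep {st : PySem.Set (Int × Int) × PySem.Set (Int × Int) × Int}
    {S : List (String × Int × Int × Int × Int)} (i : String × Int × Int × Int × Int)
    (hi : instrOK i) (h : pvRel (fun c b => S.foldl (cellSem c) b) st) :
    pvRel (fun c b => (i :: S).foldl (cellSem c) b) (instrStepB st i) := by
  obtain ⟨op, x1, y1, x2, y2⟩ := i
  show pvRel _ ((pvRect x1 y1 x2 y2).foldl (cellStepB op) st)
  apply pvInner op (fun c b => S.foldl (cellSem c) b)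
    (fun c b => ((op, x1, y1, x2, y2) :: S).foldl (cellSem c) b)
    (pvRect x1 y1 x2 y2) st (pvNodup_rect x1 y1 x2 y2) (pvRectInR hi)
  · intro c hc b
    show S.foldl (cellSem c) (cellSem c b (op, x1, y1, x2, y2)) = _
    congr 1
    simp only [cellSem]
    rw [if_pos hc]
  · obtain ⟨h1, h2, h3, h4, h5, v, hcnt, hT⟩ := h
    refine ⟨h1, h2, h3, h4, h5, v, hcnt, ?_⟩
    intro c hcR b
    beta_reduce
    by_cases hmem : c ∈ pvRect x1 y1 x2 y2
    · rw [if_pos hmem]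
      exact hT c hcR b
    · rw [if_neg hmem]
      show S.foldl (cellSem c) (cellSem c b (op, x1, y1, x2, y2)) = _
      have hcs : cellSem c b (op, x1, y1, x2, y2) = b := by
        simp only [cellSem]
        rw [if_neg hmem]
      rw [hcs]
      exact hT c hcR b

theorem pvOuter (rs : List (String × Int × Int × Int × Int)) :
    ∀ (st : PySem.Set (Int × Int) × PySem.Set (Int × Int) × Int)
      (S : List (String × Int × Int × Int × Int)),
      (∀ i ∈ rs, instrOK i) →
      pvRel (fun c b => S.foldl (cellSem c) b) st →
      pvRel (fun c b => (rs.reverse ++ S).foldl (cellSem c) b) (rs.foldl instrStepB st) := by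
  induction rs with
  | nil => intro st S _ h; simpa using h
  | cons i rs' ih =>
    intro st S hok h
    have h1 := pvOuterStep i (hok i (by simp)) h
    have h2 := ih (instrStepB st i) (i :: S) (fun j hj => hok j (by simp [hj])) h1
    simpa using h2

-- counting: split the filtered full rectangle by decided membership
theorem pvSplitCount (R d f : List (Int × Int)) (v : (Int × Int) → Bool)
    (hR : R.Nodup) (hd : d.Nodup) (hf : f.Nodup)
    (hdR : ∀ c ∈ d, c ∈ R) (hfR : ∀ c ∈ f, c ∈ R) (hdisj : ∀ c ∈ f, c ∉ d) :
    (R.filter (fun c => if c ∈ d then v c else decide (c ∈ f))).length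
      = (d.filter v).length + f.length := by
  have hperm : (R.filter (fun c => if c ∈ d then v c else decide (c ∈ f))).Perm (d.filter v ++ f) := by
    apply (List.perm_ext_iff_of_nodup (hR.filter _) ?_).mpr
    · intro c
      simp only [List.mem_filter, List.mem_append]
      constructor
      · rintro ⟨hcR, hcond⟩
        by_cases hcd : c ∈ d
        · rw [if_pos hcd] at hcond
          exact Or.inl ⟨hcd, hcond⟩
        · rw [if_neg hcd] at hcond
          exact Or.inr (of_decide_eq_true hcond)
      · rintro (⟨hcd, hv⟩ | hc)
        · exact ⟨hdR c hcd, by rw [if_pos hcd]; exact hv⟩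
        · refine ⟨hfR c hc, ?_⟩
          rw [if_neg (hdisj c hc)]
          exact decide_eq_true hc
    · exact List.Nodup.append (hd.filter _) hf
        (fun c hc1 hc2 => hdisj c hc2 (List.mem_filter.mp hc1).1)
  rw [hperm.length_eq, List.length_append]

theorem pvCountP_flatMap {α β : Type} (p : β → Bool) (f : α → List β) (l : List α) :
    (l.flatMap f).countP p = (l.map (fun a => (f a).countP p)).sum := by
  induction l with
  | nil => simp
  | cons a l ih => simp [List.flatMap_cons, List.countP_append, ih]

theorem pvFlatMap_map_id {α β : Type} (f : α → List β) (l : List α) :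
    (l.map f).flatMap id = l.flatMap f := by
  induction l with
  | nil => simp
  | cons a l ih => simp [List.flatMap_cons, ih]

-- A's final sum over the grid as a count over the full coordinate rectangle
theorem pvGridCount {g : List (List Bool)} (hg : pvWF g) :
    (g.flatMap id).count true
      = ((pvRect 0 0 999 999).filter (fun c => getCell g c.1 c.2)).length := by
  obtain ⟨hlen, hrows⟩ := hg
  have hg_eq : (PySem.List.pyRange 0 1000 1).map (fun j => PySem.List.pyGetD g j []) = g := by
    have := PySem.List.map_pyGetD_pyRange_zero g []
    rwa [show PySem.List.len g = (1000 : Int) by simp [hlen]] at this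
  have hrowline : ∀ x : Int, x ∈ PySem.List.pyRange 0 1000 1 →
      (PySem.List.pyGetD g x []).countP (· == true) =
        (PySem.List.pyRange 0 1000 1).countP (fun y => getCell g x y) := by
    intro x hx
    obtain ⟨hx0, hx1⟩ := PySem.List.mem_pyRange_one.mp hx
    rw [PySem.List.pyGetD_of_nonneg g _ hx0]
    have hrl : (g.getD x.toNat []).length = 1000 := pvRow_len ⟨hlen, hrows⟩ ⟨hx0, by omega⟩
    have hr_eq : (PySem.List.pyRange 0 1000 1).map
        (fun j => PySem.List.pyGetD (g.getD x.toNat []) j false) = g.getD x.toNat [] := by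
      have := PySem.List.map_pyGetD_pyRange_zero (g.getD x.toNat []) false
      rwa [show PySem.List.len (g.getD x.toNat []) = (1000 : Int) from by
        simp only [PySem.List.len_eq]
        exact_mod_cast hrl] at this
    conv_lhs => rw [← hr_eq]
    rw [List.countP_map]
    apply List.countP_congr
    intro y hy
    obtain ⟨hy0, hy1⟩ := PySem.List.mem_pyRange_one.mp hy
    simp only [Function.comp_apply]
    rw [PySem.List.pyGetD_of_nonneg _ _ hy0]
    unfold getCell
    simp
  have hLHS : (g.flatMap id).count true =
      ((PySem.List.pyRange 0 1000 1).map
        (fun x => (PySem.List.pyRange 0 1000 1).countP (fun y => getCell g x y))).sum := by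
    conv_lhs => rw [← hg_eq]
    rw [pvFlatMap_map_id, List.count, pvCountP_flatMap]
    exact congrArg List.sum (List.map_congr_left hrowline)
  have hRHS : ((pvRect 0 0 999 999).filter (fun c => getCell g c.1 c.2)).length =
      ((PySem.List.pyRange 0 1000 1).map
        (fun x => (PySem.List.pyRange 0 1000 1).countP (fun y => getCell g x y))).sum := by
    rw [← List.countP_eq_length_filter]
    unfold pvRect
    rw [pvCountP_flatMap]
    have h1000 : (999 : Int) + 1 = 1000 := by norm_num
    rw [h1000]
    apply congrArg List.sum
    apply List.map_congr_left
    intro x _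
    rw [List.countP_map]
    rfl
  rw [hLHS, hRHS]

theorem pvInit_wf : pvWF (List.replicate 1000 (List.replicate 1000 false)) := by
  refine ⟨List.length_replicate, fun r hr => ?_⟩
  rw [List.eq_of_mem_replicate hr, List.length_replicate]

theorem pvInit_get {c : Int × Int} (hc : pvInR c) :
    getCell (List.replicate 1000 (List.replicate 1000 false)) c.1 c.2 = false := by
  obtain ⟨h1, h2, h3, h4⟩ := hc
  unfold getCell
  rw [List.getD_replicate _ (by omega), List.getD_replicate _ (by omega)]

-- ===== VERDICT (by name: the statement is the Claim_ definition above) =====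
theorem part1_spec : Claim_equal_part1 := by
  intro data _ hpre
  unfold Spec_part1
  set instrs := data.filterMap parseLineB with hinstrs
  have hok : ∀ i ∈ instrs, instrOK i := by
    intro i hi
    rw [hinstrs, List.mem_filterMap] at hi
    obtain ⟨l, hl, hp⟩ := hi
    exact pvParseOK l (hpre l hl) i hp
  -- A side
  have hA : part1 data =
      (((instrs.foldl applyInstr (List.replicate 1000 (List.replicate 1000 false))).flatMap id).count true : Int) := by
    show (((data.foldl stepA (List.replicate 1000 (List.replicate 1000 false))).flatMap id).count true : Int) = _
    rw [pvFoldA data hpre]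
  obtain ⟨hwfG, hgetG⟩ := pvFoldInstr_cell instrs _ hok pvInit_wf
  -- B side
  have hrel0 : pvRel (fun c b => ([] : List (String × Int × Int × Int × Int)).foldl (cellSem c) b)
      ((PySem.Set.empty : PySem.Set (Int × Int)), (PySem.Set.empty : PySem.Set (Int × Int)), (0 : Int)) := by
    refine ⟨List.nodup_nil, List.nodup_nil, by simp [PySem.Set.empty], by simp [PySem.Set.empty],
      by simp [PySem.Set.empty], fun _ => false, by simp [PySem.Set.empty], ?_⟩
    intro c _ b
    simp [PySem.Set.empty]
  have hrelF := pvOuter instrs.reverse _ [] (fun i hi => hok i (by simpa using hi)) hrel0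
  rw [List.reverse_reverse, List.append_nil] at hrelF
  set st := instrs.reverse.foldl instrStepB
    ((PySem.Set.empty : PySem.Set (Int × Int)), (PySem.Set.empty : PySem.Set (Int × Int)), (0 : Int)) with hst
  obtain ⟨hdnd, hfnd, hdisj, hdR, hfR, v, hcnt, hT⟩ := hrelF
  have hB : part1_alt data = st.2.2 + PySem.Set.len st.2.1 := rfl
  -- combine
  have hsplit := pvSplitCount (pvRect 0 0 999 999) st.1 st.2.1 v
    (pvNodup_rect 0 0 999 999) hdnd hfnd
    (fun c hc => pvMem_rect.mpr (by have := hdR c hc; exact ⟨this.1, this.2.1, this.2.2.1, this.2.2.2⟩))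
    (fun c hc => pvMem_rect.mpr (by have := hfR c hc; exact ⟨this.1, this.2.1, this.2.2.1, this.2.2.2⟩))
    hdisj
  have hgfun : ∀ c ∈ pvRect 0 0 999 999,
      getCell (instrs.foldl applyInstr (List.replicate 1000 (List.replicate 1000 false))) c.1 c.2
        = (if c ∈ st.1 then v c else decide (c ∈ st.2.1)) := by
    intro c hc
    have hcR : pvInR c := by
      have := pvMem_rect.mp hc
      exact ⟨by omega, by omega, by omega, by omega⟩
    rw [hgetG c hcR, pvInit_get hcR]
    have hTc := hT c hcR false
    simp only at hTc
    rw [hTc]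
    split
    · rfl
    · by_cases hm : c ∈ st.2.1 <;> simp [hm]
  have hfilter_eq :
      ((pvRect 0 0 999 999).filter
        (fun c => getCell (instrs.foldl applyInstr (List.replicate 1000 (List.replicate 1000 false))) c.1 c.2))
      = ((pvRect 0 0 999 999).filter (fun c => if c ∈ st.1 then v c else decide (c ∈ st.2.1))) :=
    List.filter_congr hgfun
  rw [hA, hB, pvGridCount hwfG, hfilter_eq, hsplit, hcnt]
  show (((st.1.filter v).length + st.2.1.length : Nat) : Int) = _
  push_cast
  rfl
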